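-- pv_equiv track=rewrite | github.com/Smirn08/Follow-Football-Bot | additional_files/unused_last_matches.py | print_result
-- ===== SOURCE A (Python) =====
-- def print_result(match_info):
--     # блок выводов результата прошедших матчей
--     LIST = []
--     for elements in match_info:
--         LIST.append(elements[0])
--         LIST.append(elements[1])
--         LIST.append(elements[2])
--         LIST.append(elements[3])
--         LIST.append(elements[4])
--     text = f'''{LIST[0]} | ({LIST[1]})
-- {LIST[2]} {LIST[3]} {LIST[4]}
--
-- {LIST[5]} | ({LIST[6]})
-- {LIST[7]} {LIST[8]} {LIST[9]}
--
-- {LIST[10]} | ({LIST[11]})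
-- {LIST[12]} {LIST[13]} {LIST[14]}
--
-- {LIST[15]} | ({LIST[16]})
-- {LIST[17]} {LIST[18]} {LIST[19]}
--
-- {LIST[20]} | ({LIST[21]})
-- {LIST[22]} {LIST[23]} {LIST[24]}'''
--
--     return text
-- ===== SOURCE B (Python) =====
-- def print_result(match_info):
--     # one formatted block per match, joined; only the first five matches are read
--     blocks = []
--     for i in range(5):
--         m = match_info[i]
--         blocks.append(f'{m[0]} | ({m[1]})\n{m[2]} {m[3]} {m[4]}')
--     return '\n\n'.join(blocks)
-- ===== Notes on version B (the rewrite author's own statement) =====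
-- stated objective: simpler
-- what changed: B formats one block string per match (first five matches, indexed explicitly) and joins the five blocks with '\n\n', instead of flattening all fields of every match into one 25-element list and indexing it 0..24 in a single giant f-string.
import Mathlib
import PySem

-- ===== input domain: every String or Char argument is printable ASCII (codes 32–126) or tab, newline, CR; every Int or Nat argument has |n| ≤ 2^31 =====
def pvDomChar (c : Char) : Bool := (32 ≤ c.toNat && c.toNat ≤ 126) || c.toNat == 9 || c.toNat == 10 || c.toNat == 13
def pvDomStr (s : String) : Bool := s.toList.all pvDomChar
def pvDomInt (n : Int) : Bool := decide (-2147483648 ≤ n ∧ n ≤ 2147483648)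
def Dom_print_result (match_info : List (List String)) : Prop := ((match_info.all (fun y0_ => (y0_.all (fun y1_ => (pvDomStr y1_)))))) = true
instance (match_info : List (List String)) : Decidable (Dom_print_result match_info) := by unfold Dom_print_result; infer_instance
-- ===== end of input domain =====

-- B builds one formatted block per match and joins them, instead of flattening all
-- fields into one 25-element list first; same return value on Pre_, simpler decomposition.

-- ===== PORT A =====
def print_result (match_info : List (List String)) : String :=
  let LIST : List String := match_info.foldl (fun acc elements =>
    acc ++ [PySem.List.pyGetD elements 0 "", PySem.List.pyGetD elements 1 "",
            PySem.List.pyGetD elements 2 "", PySem.List.pyGetD elements 3 "",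
            PySem.List.pyGetD elements 4 ""]) []
  PySem.List.pyGetD LIST 0 "" ++ " | (" ++ PySem.List.pyGetD LIST 1 "" ++ ")\n" ++ PySem.List.pyGetD LIST 2 "" ++ " " ++ PySem.List.pyGetD LIST 3 "" ++ " " ++ PySem.List.pyGetD LIST 4 "" ++ "\n\n" ++
  PySem.List.pyGetD LIST 5 "" ++ " | (" ++ PySem.List.pyGetD LIST 6 "" ++ ")\n" ++ PySem.List.pyGetD LIST 7 "" ++ " " ++ PySem.List.pyGetD LIST 8 "" ++ " " ++ PySem.List.pyGetD LIST 9 "" ++ "\n\n" ++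
  PySem.List.pyGetD LIST 10 "" ++ " | (" ++ PySem.List.pyGetD LIST 11 "" ++ ")\n" ++ PySem.List.pyGetD LIST 12 "" ++ " " ++ PySem.List.pyGetD LIST 13 "" ++ " " ++ PySem.List.pyGetD LIST 14 "" ++ "\n\n" ++
  PySem.List.pyGetD LIST 15 "" ++ " | (" ++ PySem.List.pyGetD LIST 16 "" ++ ")\n" ++ PySem.List.pyGetD LIST 17 "" ++ " " ++ PySem.List.pyGetD LIST 18 "" ++ " " ++ PySem.List.pyGetD LIST 19 "" ++ "\n\n" ++
  PySem.List.pyGetD LIST 20 "" ++ " | (" ++ PySem.List.pyGetD LIST 21 "" ++ ")\n" ++ PySem.List.pyGetD LIST 22 "" ++ " " ++ PySem.List.pyGetD LIST 23 "" ++ " " ++ PySem.List.pyGetD LIST 24 ""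

-- ===== PORT B =====
def pvBlock (m : List String) : String :=
  PySem.List.pyGetD m 0 "" ++ " | (" ++ PySem.List.pyGetD m 1 "" ++ ")\n" ++
  PySem.List.pyGetD m 2 "" ++ " " ++ PySem.List.pyGetD m 3 "" ++ " " ++ PySem.List.pyGetD m 4 ""

def print_result_alt (match_info : List (List String)) : String :=
  let blocks : List String := (PySem.List.pyRange 0 5 1).foldl (fun blocks i =>
    let m := PySem.List.pyGetD match_info i []
    blocks ++ [pvBlock m]) []
  PySem.Str.join "\n\n" blocks

-- ===== PRECONDITION & SPEC =====
-- Pre_ excludes exactly the inputs on which Python A raises IndexError: fewer than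
-- five matches, or any match row (even one past the fifth: A's loop reads them all)
-- with fewer than five fields.
def Pre_print_result (match_info : List (List String)) : Prop :=
  5 ≤ match_info.length ∧ ∀ e ∈ match_info, 5 ≤ e.length
instance (match_info : List (List String)) : Decidable (Pre_print_result match_info) := by unfold Pre_print_result; infer_instance

def pvWitness_print_result : List (List String) :=
  [["A","1","a","-","b"],["B","2","c","-","d"],["C","3","e","-","f"],
   ["D","4","g","-","h"],["E","5","i","-","j"]]

def Spec_print_result (match_info : List (List String)) (out : String) : Prop := out = print_result_alt match_info
instance (match_info : List (List String)) (out : String) : Decidable (Spec_print_result match_info out) := by unfold Spec_print_result; infer_instance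

-- ===== CLAIM (what is proved, stated in full; the proofs are below) =====
def Claim_equal_print_result : Prop := ∀ (match_info : List (List String)), Dom_print_result match_info → Pre_print_result match_info → Spec_print_result match_info (print_result match_info)

-- ===== LEMMAS AND PROOFS =====

theorem five_dest {α : Type} (l : List α) (h : 5 ≤ l.length) :
    ∃ a b c d e r, l = a::b::c::d::e::r := by
  match l with
  | a::b::c::d::e::r => exact ⟨a,b,c,d,e,r,rfl⟩
  | [] => simp at h
  | [_] => simp at h
  | [_,_] => simp at h
  | [_,_,_] => simp at h
  | [_,_,_,_] => simp at h

theorem print_result_eq_alt (match_info : List (List String))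
    (hpre : Pre_print_result match_info) :
    print_result match_info = print_result_alt match_info := by
  obtain ⟨hlen, hall⟩ := hpre
  obtain ⟨m0,m1,m2,m3,m4,rest,rfl⟩ := five_dest match_info hlen
  obtain ⟨a0,b0,c0,d0,e0,r0,rfl⟩ := five_dest m0 (hall _ (by simp))
  obtain ⟨a1,b1,c1,d1,e1,r1,rfl⟩ := five_dest m1 (hall _ (by simp))
  obtain ⟨a2,b2,c2,d2,e2,r2,rfl⟩ := five_dest m2 (hall _ (by simp))
  obtain ⟨a3,b3,c3,d3,e3,r3,rfl⟩ := five_dest m3 (hall _ (by simp))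
  obtain ⟨a4,b4,c4,d4,e4,r4,rfl⟩ := five_dest m4 (hall _ (by simp))
  unfold print_result print_result_alt pvBlock
  have hr : PySem.List.pyRange 0 5 1 = [0,1,2,3,4] := by decide
  rw [hr]
  simp only [List.foldl_cons, List.foldl_nil, List.nil_append, List.cons_append]
  rw [PySem.List.foldl_append_eq_flatMap]
  simp only [List.cons_append, PySem.List.pyGetD_ofNat', List.getD_cons_zero,
    List.getD_cons_succ]
  rw [← String.toList_inj]
  simp [PySem.Str.join, PySem.Chars.join_cons_cons, String.toList_append]


-- ===== VERDICT (by name: the statement is the Claim_ definition above) =====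
theorem print_result_spec : Claim_equal_print_result := by
  intro mi _ hpre
  exact print_result_eq_alt mi hpre
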